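-- pv_equiv track=rewrite | github.com/Osmar97/Mancala | controllers/verifyGame.py | verify_if_game_is_finnished
-- ===== SOURCE A (Python) =====
-- def verify_if_game_is_finnished(board:list[int]) -> bool:
--     game_is_finished:bool = 0
--     zero_count:int = 0
--
--     for i in range(len(board)):
--         if i < 7:
--             if board[i] == 0:
--                 zero_count += 1
--                 if zero_count == 6:
--                     game_is_finished = 1
--                     break
--             if i == 6 and zero_count > 0:
--                 zero_count = 0
--
--         elif i > 6 and i < 13:
--             if board[i] == 0:
--                 zero_count += 1
--                 if zero_count == 6:
--                     game_is_finished = 1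
--                     break
--
--     return game_is_finished
-- ===== SOURCE B (Python) =====
-- def verify_if_game_is_finnished(board: list[int]) -> bool:
--     # One side is finished when it shows 6 empty slots: A counts index 6 (the
--     # store) together with pits 0-5, so the first group is board[:7].
--     return 1 if board[:7].count(0) >= 6 or board[7:13].count(0) >= 6 else 0
-- ===== Notes on version B (the rewrite author's own statement) =====
-- stated objective: simpler
-- what changed: Replaces the stateful index loop with break/reset bookkeeping by two slice zero-counts (board[:7] and board[7:13]) compared against the threshold 6.
import Mathlib
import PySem

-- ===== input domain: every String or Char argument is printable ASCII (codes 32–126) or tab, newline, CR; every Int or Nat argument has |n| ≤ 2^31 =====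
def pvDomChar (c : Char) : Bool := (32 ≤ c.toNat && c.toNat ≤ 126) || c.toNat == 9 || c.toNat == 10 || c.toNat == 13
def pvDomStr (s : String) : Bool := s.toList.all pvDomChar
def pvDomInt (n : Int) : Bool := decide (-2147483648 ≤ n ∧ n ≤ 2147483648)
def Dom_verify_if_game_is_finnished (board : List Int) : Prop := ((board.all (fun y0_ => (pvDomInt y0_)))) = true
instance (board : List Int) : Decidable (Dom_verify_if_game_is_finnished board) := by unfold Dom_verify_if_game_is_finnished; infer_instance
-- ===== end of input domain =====

-- B replaces A's stateful index loop (zero counter with break and mid-loop reset)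
-- by two slice zero-counts compared against the threshold 6 — simpler.


-- ===== PORT A =====
-- A's for-loop over range(len(board)) with board[i] lookups, ported as a recursion
-- over the enumerated list: state = zero_count, early return 1 = break with game_is_finished = 1.
def aLoop : List (Int × Int) → Int → Int
  | [], _ => 0
  | (i, x) :: rest, zc =>
    if i < 7 then
      if x = 0 then
        if zc + 1 = 6 then 1
        else aLoop rest (if i = 6 ∧ zc + 1 > 0 then 0 else zc + 1)
      else aLoop rest (if i = 6 ∧ zc > 0 then 0 else zc)
    else if 6 < i ∧ i < 13 then
      if x = 0 then
        if zc + 1 = 6 then 1 else aLoop rest (zc + 1)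
      else aLoop rest zc
    else aLoop rest zc

def verify_if_game_is_finnished (board : List Int) : Int :=
  aLoop (PySem.List.enumerate board 0) 0

-- ===== PORT B =====
def verify_if_game_is_finnished_alt (board : List Int) : Int :=
  if 6 ≤ (PySem.List.slice board (some 0) (some 7)).count 0
      ∨ 6 ≤ (PySem.List.slice board (some 7) (some 13)).count 0
  then 1 else 0

-- ===== PRECONDITION & SPEC =====
def Spec_verify_if_game_is_finnished (board : List Int) (out : Int) : Prop := out = verify_if_game_is_finnished_alt board
instance (board : List Int) (out : Int) : Decidable (Spec_verify_if_game_is_finnished board out) := by unfold Spec_verify_if_game_is_finnished; infer_instance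

-- ===== CLAIM (what is proved, stated in full; the proofs are below) =====
def Claim_equal_verify_if_game_is_finnished : Prop := ∀ (board : List Int), Dom_verify_if_game_is_finnished board → Spec_verify_if_game_is_finnished board (verify_if_game_is_finnished board)

-- ===== LEMMAS AND PROOFS =====

-- Second phase of A's loop (indices ≥ 7): only the zeros at indices 7..12 matter.
theorem aLoop_phase2 (bs : List Int) (k : Nat) (zc : Int)
    (hk : 7 ≤ k) (h0 : 0 ≤ zc) (h5 : zc ≤ 5) :
    aLoop (PySem.List.enumerate bs (k : Int)) zc =
      if 6 ≤ zc + ((bs.take (13 - k)).count 0 : Int) then 1 else 0 := by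
  induction bs generalizing k zc with
  | nil => simp [PySem.List.enumerate_nil, aLoop]; omega
  | cons b bs ih =>
    rw [PySem.List.enumerate_cons, aLoop]
    have hcast : ((k : Int) + 1) = ((k + 1 : Nat) : Int) := by push_cast; ring
    have h7 : ¬ ((k : Int) < 7) := by exact_mod_cast not_lt.mpr (by exact_mod_cast hk)
    rw [if_neg h7, hcast]
    by_cases hk13 : k < 13
    · have h613 : (6 : Int) < (k : Int) ∧ (k : Int) < 13 := by
        constructor <;> exact_mod_cast (by omega : _)
      rw [if_pos h613]
      have htake : (b :: bs).take (13 - k) = b :: bs.take (13 - (k + 1)) := by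
        have h : 13 - k = (13 - (k + 1)) + 1 := by omega
        rw [h, List.take_succ_cons]
      by_cases hb : b = 0
      · subst hb
        rw [if_pos rfl, htake]
        by_cases h6 : zc + 1 = 6
        · rw [if_pos h6]
          have : (6 : Int) ≤ zc + (((0 : Int) :: bs.take (13 - (k + 1))).count 0 : Int) := by
            simp [List.count_cons]; omega
          rw [if_pos this]
        · rw [if_neg h6, ih (k + 1) (zc + 1) (by omega) (by omega) (by omega)]
          simp [List.count_cons]
          split_ifs <;> omega
      · rw [if_neg hb, htake, ih (k + 1) zc (by omega) h0 h5]
        simp [List.count_cons, hb]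
    · have h613 : ¬ ((6 : Int) < (k : Int) ∧ (k : Int) < 13) := by
        rintro ⟨-, h⟩; have : k < 13 := by exact_mod_cast h
        omega
      rw [if_neg h613, ih (k + 1) zc (by omega) h0 h5]
      have e1 : 13 - k = 0 := by omega
      have e2 : 13 - (k + 1) = 0 := by omega
      rw [e1, e2]
      simp

-- First phase of A's loop (indices ≤ 6): the counter is reset after index 6,
-- so the result depends on the zeros up to index 6 and the zeros at indices 7..12.
theorem aLoop_phase1 (bs : List Int) (k : Nat) (zc : Int)
    (hk : k ≤ 6) (h0 : 0 ≤ zc) (h5 : zc ≤ 5) :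
    aLoop (PySem.List.enumerate bs (k : Int)) zc =
      if 6 ≤ zc + ((bs.take (7 - k)).count 0 : Int) then 1
      else if 6 ≤ (((bs.drop (7 - k)).take 6).count 0 : Int) then 1 else 0 := by
  induction bs generalizing k zc with
  | nil => simp [PySem.List.enumerate_nil, aLoop]; omega
  | cons b bs ih =>
    rw [PySem.List.enumerate_cons, aLoop]
    have hcast : ((k : Int) + 1) = ((k + 1 : Nat) : Int) := by push_cast; ring
    have h7 : ((k : Int) < 7) := by exact_mod_cast (by omega : k < 7)
    rw [if_pos h7, hcast]
    have htake : (b :: bs).take (7 - k) = b :: bs.take (7 - (k + 1)) := by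
      have h : 7 - k = (7 - (k + 1)) + 1 := by omega
      rw [h, List.take_succ_cons]
    have hdrop : (b :: bs).drop (7 - k) = bs.drop (7 - (k + 1)) := by
      have h : 7 - k = (7 - (k + 1)) + 1 := by omega
      rw [h, List.drop_succ_cons]
    by_cases hk6 : k = 6
    · -- index 6: after this step the counter is reset and phase 2 begins at index 7
      subst hk6
      have hi6 : ((6 : Nat) : Int) = 6 := by norm_num
      by_cases hb : b = 0
      · subst hb
        rw [if_pos rfl]
        by_cases h6 : zc + 1 = 6
        · rw [if_pos h6, htake]
          have : (6:Int) ≤ zc + (((0:Int) :: bs.take (7 - (6+1))).count 0 : Int) := by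
            simp [List.count_cons]; omega
          rw [if_pos this]
        · rw [if_neg h6]
          have hr : (if ((6:Nat):Int) = 6 ∧ zc + 1 > 0 then (0:Int) else zc + 1) = 0 := by
            rw [if_pos ⟨hi6, by omega⟩]
          rw [hr, aLoop_phase2 bs 7 0 (by omega) (by omega) (by omega), htake, hdrop]
          have hne : ¬ (6:Int) ≤ zc + (((0:Int) :: bs.take (7 - (6+1))).count 0 : Int) := by
            simp [List.count_cons]; omega
          rw [if_neg hne]
          simp
      · rw [if_neg hb]
        have hr : (if ((6:Nat):Int) = 6 ∧ zc > 0 then (0:Int) else zc) = if zc > 0 then 0 else zc := by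
          by_cases h : zc > 0
          · rw [if_pos ⟨hi6, h⟩, if_pos h]
          · rw [if_neg (by tauto), if_neg h]
        rw [hr]
        have hzc0 : (if zc > 0 then (0:Int) else zc) = 0 ∨ (if zc > 0 then (0:Int) else zc) = zc := by
          split_ifs <;> simp
        have hstep : aLoop (PySem.List.enumerate bs ((6 + 1 : Nat) : Int)) (if zc > 0 then (0:Int) else zc) =
            if 6 ≤ (if zc > 0 then (0:Int) else zc) + ((bs.take (13 - 7)).count 0 : Int) then 1 else 0 := by
          rcases hzc0 with h | h <;>
            · rw [h]; exact aLoop_phase2 bs 7 _ (by omega) (by omega) (by omega)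
        rw [hstep, htake, hdrop]
        have hne : ¬ (6:Int) ≤ zc + ((b :: bs.take (7 - (6+1))).count 0 : Int) := by
          simp [List.count_cons, hb]; omega
        rw [if_neg hne]
        have he : (if zc > 0 then (0:Int) else zc) + ((bs.take (13 - 7)).count 0 : Int)
            = ((bs.take 6).count 0 : Int) := by
          split_ifs <;> simp_all <;> omega
        rw [he]
        simp
    · -- index k < 6: stay in phase 1
      have hkne : ¬ ((k : Int) = 6) := by
        intro h; exact hk6 (by exact_mod_cast h)
      by_cases hb : b = 0
      · subst hb
        rw [if_pos rfl]
        by_cases h6 : zc + 1 = 6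
        · rw [if_pos h6, htake]
          have : (6:Int) ≤ zc + (((0:Int) :: bs.take (7 - (k+1))).count 0 : Int) := by
            simp [List.count_cons]; omega
          rw [if_pos this]
        · rw [if_neg h6]
          have hr : (if (k:Int) = 6 ∧ zc + 1 > 0 then (0:Int) else zc + 1) = zc + 1 := by
            rw [if_neg]; rintro ⟨h, -⟩; exact hkne h
          rw [hr, ih (k + 1) (zc + 1) (by omega) (by omega) (by omega), htake, hdrop]
          simp [List.count_cons]
          split_ifs <;> first | rfl | omega
      · rw [if_neg hb]
        have hr : (if (k:Int) = 6 ∧ zc > 0 then (0:Int) else zc) = zc := by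
          rw [if_neg]; rintro ⟨h, -⟩; exact hkne h
        rw [hr, ih (k + 1) zc (by omega) h0 h5, htake, hdrop]
        simp [List.count_cons, hb]

-- ===== VERDICT (by name: the statement is the Claim_ definition above) =====
theorem verify_if_game_is_finnished_spec : Claim_equal_verify_if_game_is_finnished := by
  intro board _
  unfold Spec_verify_if_game_is_finnished verify_if_game_is_finnished verify_if_game_is_finnished_alt
  have h := aLoop_phase1 board 0 0 (by omega) (by omega) (by omega)
  simp only [Nat.cast_zero, Nat.sub_zero] at h
  rw [h]
  have hs1 : PySem.List.slice board (some 0) (some 7) = board.take 7 := by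
    simp [pysem]
  have hs2 : PySem.List.slice board (some 7) (some 13) = (board.drop 7).take 6 := by
    have h2 := PySem.List.slice_natCast (xs := board) (a := 7) (b := 13)
    norm_num at h2
    simpa using h2
  rw [hs1, hs2]
  split_ifs with h1 h2 h3 h3 <;> first | rfl | (exfalso; omega)
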